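-- pv_equiv track=rewrite | github.com/jstr045329/hask-to-vhdl | src/py/generatePipelinedMinFunction.py | mapOneBatch
-- ===== SOURCE A (Python) =====
-- INPUTS_PER_INTERMEDIATE = 4
--
-- def tab(n=1):
--     return "    " * n
--
-- def declareOneIntermediate(n):
--     return "signal s_smallest_intermediate_%04d : integer;" % n
--
-- def resetOneIntermediate(n):
--     return "s_smallest_intermediate_%04d <= max_integer;" % n
--
-- def oneIntermediateName(n):
--     return "s_smallest_intermediate_%04d" % n
--
-- def declareOneVariable(n):
--     return "variable v_smallest_intermediate_%04d : integer;" % n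
--
-- def initializeFirstStageVariable(n):
--     return tab(3) + "v_smallest_intermediate_%04d := max_integer;" % (n,)
--
-- def initializeUpperStageVariable(n_out):
--     return initializeFirstStageVariable(n_out)
--
-- def assignIntermediate(n):
--     return tab(3) + "s_smallest_intermediate_%04d <= v_smallest_intermediate_%04d;" % (n, n)
--
-- def makeOneIntermediateIfStatement(n_in, n_out):
--     return [ \
--         """if s_smallest_intermediate_%04d < v_smallest_intermediate_%04d then""" % (n_in, n_out),
--         tab(1) + """v_smallest_intermediate_%04d := s_smallest_intermediate_%04d;""" % (n_out, n_in),
--         """end if;""",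
--         """""",
--         ]
--
-- def mapOneBatch(sig_num_list, startingIntermediate):
--     intermediate_num = startingIntermediate
--     signal_num = 0
--     one_assignment_batch = []
--     new_signal_decs = []
--     new_variable_decs = []
--     new_variable_initializations = []
--     new_signal_assignments = []
--     new_signal_resets = [] # todo: populate this
--     new_intermediate_assignments = [] # todo: populate this
--     new_signal_names = []
--
--     # Map 0 -> 15 to 16 -> 19
--
--     while len(sig_num_list) > 0:
--         if (signal_num % INPUTS_PER_INTERMEDIATE == 0):
--             new_signal_decs.append(declareOneIntermediate(intermediate_num))
--             new_variable_decs.append(declareOneVariable(intermediate_num))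
--             new_variable_initializations.append(initializeUpperStageVariable(intermediate_num))
--
--             # the following needs to be wrapped in an if statement?
--             new_signal_assignments.append(assignIntermediate(intermediate_num))
--             new_signal_resets.append(resetOneIntermediate(intermediate_num))
--             # new_intermediate_assignments.append(
--             new_signal_names.append(oneIntermediateName(intermediate_num))
--         n = sig_num_list[0]
--
--         # makeOneIntermediateIfStatement(n_in, n_out):
--         one_assignment_batch.extend(makeOneIntermediateIfStatement(n, intermediate_num))
--         signal_num += 1
--         del(sig_num_list[0])
--         if (signal_num % INPUTS_PER_INTERMEDIATE == 0):
--             intermediate_num += 1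
--     new_intermediate_assignments.append(one_assignment_batch)
--     return new_signal_decs, \
--             new_signal_resets, \
--             new_variable_decs, \
--             new_variable_initializations, \
--             new_intermediate_assignments, \
--             new_signal_assignments, \
--             intermediate_num, \
--             new_signal_names
-- ===== SOURCE B (Python) =====
-- INPUTS_PER_INTERMEDIATE = 4
--
-- def _nm(prefix, n):
--     return "%s_smallest_intermediate_%04d" % (prefix, n)
--
-- def _if_lines(n_in, n_out):
--     return ["if %s < %s then" % (_nm("s", n_in), _nm("v", n_out)),
--             "    %s := %s;" % (_nm("v", n_out), _nm("s", n_in)),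
--             "end if;",
--             ""]
--
-- def mapOneBatch(sig_num_list, startingIntermediate):
--     n = len(sig_num_list)
--     pending = sig_num_list[:]
--     del sig_num_list[:]  # reproduce A's emptying of the argument list
--     decs, resets, vdecs, vinits, assigns, names, batch = [], [], [], [], [], [], []
--     m = startingIntermediate
--     while pending:
--         chunk, pending = pending[:INPUTS_PER_INTERMEDIATE], pending[INPUTS_PER_INTERMEDIATE:]
--         s_name, v_name = _nm("s", m), _nm("v", m)
--         decs.append("signal %s : integer;" % s_name)
--         resets.append("%s <= max_integer;" % s_name)
--         vdecs.append("variable %s : integer;" % v_name)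
--         vinits.append("            %s := max_integer;" % v_name)
--         assigns.append("            %s <= %s;" % (s_name, v_name))
--         names.append(s_name)
--         for sig in chunk:
--             batch.extend(_if_lines(sig, m))
--         m += 1
--     return (decs, resets, vdecs, vinits, [batch], assigns,
--             startingIntermediate + n // INPUTS_PER_INTERMEDIATE, names)
-- ===== Notes on version B (the rewrite author's own statement) =====
-- stated objective: simpler
-- what changed: A's one-signal-at-a-time loop with a signal_num counter, %4 tests and a deferred intermediate_num bump is replaced by a plain loop over chunks of 4 that emits each declaration group once and returns startingIntermediate + len//4 computed up front.
import Mathlib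
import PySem

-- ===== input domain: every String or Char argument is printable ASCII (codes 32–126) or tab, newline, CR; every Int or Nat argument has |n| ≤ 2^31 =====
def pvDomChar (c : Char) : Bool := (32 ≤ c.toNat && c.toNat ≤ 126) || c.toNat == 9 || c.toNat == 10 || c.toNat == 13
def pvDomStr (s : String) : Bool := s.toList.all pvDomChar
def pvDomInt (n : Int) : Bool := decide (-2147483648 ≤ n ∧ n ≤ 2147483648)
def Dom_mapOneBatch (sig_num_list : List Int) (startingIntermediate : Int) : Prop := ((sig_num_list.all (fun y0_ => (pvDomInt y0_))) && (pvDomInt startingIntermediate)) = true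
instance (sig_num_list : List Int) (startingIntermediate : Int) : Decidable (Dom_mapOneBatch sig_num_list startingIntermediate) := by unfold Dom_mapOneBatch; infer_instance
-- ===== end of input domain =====

-- B replaces A's one-signal-at-a-time stateful loop (signal_num counter, %-tests, deferred
-- intermediate_num bump) by a plain chunks-of-4 loop that emits each declaration group once;
-- objective: simpler. Both A and B empty the argument list in place (Python side); the
-- equivalence proved here is about the return value.

-- ===== PORT A =====
-- "%04d" % n  (zero-padded to width 4, sign included in the width, exact for every int)
def pvFmt04 (n : Int) : List Char :=
  if n < 0 then '-' :: (List.replicate (3 - (PySem.Int.toChars (-n)).length) '0' ++ PySem.Int.toChars (-n))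
  else List.replicate (4 - (PySem.Int.toChars n).length) '0' ++ PySem.Int.toChars n

def tabA (n : Nat) : List Char := (List.replicate n "    ".toList).flatten

def declareOneIntermediateA (n : Int) : String :=
  String.ofList ("signal s_smallest_intermediate_".toList ++ pvFmt04 n ++ " : integer;".toList)

def resetOneIntermediateA (n : Int) : String :=
  String.ofList ("s_smallest_intermediate_".toList ++ pvFmt04 n ++ " <= max_integer;".toList)

def oneIntermediateNameA (n : Int) : String :=
  String.ofList ("s_smallest_intermediate_".toList ++ pvFmt04 n)

def declareOneVariableA (n : Int) : String :=
  String.ofList ("variable v_smallest_intermediate_".toList ++ pvFmt04 n ++ " : integer;".toList)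

def initializeUpperStageVariableA (n : Int) : String :=
  String.ofList (tabA 3 ++ "v_smallest_intermediate_".toList ++ pvFmt04 n ++ " := max_integer;".toList)

def assignIntermediateA (n : Int) : String :=
  String.ofList (tabA 3 ++ "s_smallest_intermediate_".toList ++ pvFmt04 n ++ " <= v_smallest_intermediate_".toList ++ pvFmt04 n ++ ";".toList)

def makeOneIntermediateIfStatementA (nIn nOut : Int) : List String :=
  [ String.ofList ("if s_smallest_intermediate_".toList ++ pvFmt04 nIn ++ " < v_smallest_intermediate_".toList ++ pvFmt04 nOut ++ " then".toList),
    String.ofList (tabA 1 ++ "v_smallest_intermediate_".toList ++ pvFmt04 nOut ++ " := s_smallest_intermediate_".toList ++ pvFmt04 nIn ++ ";".toList),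
    "end if;",
    "" ]

-- the while-loop of A, state carried exactly as A carries it
def loopA : List Int → Int → Int → List String → List String → List String → List String → List String → List String → List String →
    (List String × List String × List String × List String × List (List String) × List String × Int × List String)
  | [], inter, _, batch, decs, vdecs, vinits, assigns, resets, names =>
      (decs, resets, vdecs, vinits, [batch], assigns, inter, names)
  | n :: rest, inter, signum, batch, decs, vdecs, vinits, assigns, resets, names =>
      let cond := PySem.Int.mod signum 4 == 0
      let decs := if cond then decs ++ [declareOneIntermediateA inter] else decs
      let vdecs := if cond then vdecs ++ [declareOneVariableA inter] else vdecs
      let vinits := if cond then vinits ++ [initializeUpperStageVariableA inter] else vinits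
      let assigns := if cond then assigns ++ [assignIntermediateA inter] else assigns
      let resets := if cond then resets ++ [resetOneIntermediateA inter] else resets
      let names := if cond then names ++ [oneIntermediateNameA inter] else names
      let batch := batch ++ makeOneIntermediateIfStatementA n inter
      let signum := signum + 1
      let inter := if PySem.Int.mod signum 4 == 0 then inter + 1 else inter
      loopA rest inter signum batch decs vdecs vinits assigns resets names

def mapOneBatch (sig_num_list : List Int) (startingIntermediate : Int) : List String × List String × List String × List String × List (List String) × List String × Int × List String :=
  loopA sig_num_list startingIntermediate 0 [] [] [] [] [] [] []

-- ===== PORT B =====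
def nmB (pre : List Char) (n : Int) : List Char :=
  pre ++ "_smallest_intermediate_".toList ++ pvFmt04 n

def ifLinesB (nIn nOut : Int) : List String :=
  [ String.ofList ("if ".toList ++ nmB "s".toList nIn ++ " < ".toList ++ nmB "v".toList nOut ++ " then".toList),
    String.ofList ("    ".toList ++ nmB "v".toList nOut ++ " := ".toList ++ nmB "s".toList nIn ++ ";".toList),
    "end if;",
    "" ]

-- B's while-loop over chunks of 4; returns (decs, resets, vdecs, vinits, assigns, names, batch)
def loopB : List Int → Int → (List String × List String × List String × List String × List String × List String × List String)
  | [], _ => ([], [], [], [], [], [], [])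
  | a :: t, m =>
      let chunk := PySem.List.slice (a :: t) none (some 4)
      let rest := PySem.List.slice (a :: t) (some 4) none
      let r := loopB rest (m + 1)
      ( String.ofList ("signal ".toList ++ nmB "s".toList m ++ " : integer;".toList) :: r.1,
        String.ofList (nmB "s".toList m ++ " <= max_integer;".toList) :: r.2.1,
        String.ofList ("variable ".toList ++ nmB "v".toList m ++ " : integer;".toList) :: r.2.2.1,
        String.ofList ("            ".toList ++ nmB "v".toList m ++ " := max_integer;".toList) :: r.2.2.2.1,
        String.ofList ("            ".toList ++ nmB "s".toList m ++ " <= ".toList ++ nmB "v".toList m ++ ";".toList) :: r.2.2.2.2.1,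
        String.ofList (nmB "s".toList m) :: r.2.2.2.2.2.1,
        (chunk.foldl (fun acc s => acc ++ ifLinesB s m) []) ++ r.2.2.2.2.2.2 )
  termination_by l => l.length
  decreasing_by
    simp [PySem.List.slice_from]

def mapOneBatch_alt (sig_num_list : List Int) (startingIntermediate : Int) : List String × List String × List String × List String × List (List String) × List String × Int × List String :=
  let r := loopB sig_num_list startingIntermediate
  (r.1, r.2.1, r.2.2.1, r.2.2.2.1, [r.2.2.2.2.2.2], r.2.2.2.2.1,
   startingIntermediate + PySem.Int.floordiv (sig_num_list.length : Int) 4,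
   r.2.2.2.2.2.1)

-- ===== PRECONDITION & SPEC =====
def Spec_mapOneBatch (sig_num_list : List Int) (startingIntermediate : Int) (out : List String × List String × List String × List String × List (List String) × List String × Int × List String) : Prop := out = mapOneBatch_alt sig_num_list startingIntermediate
instance (sig_num_list : List Int) (startingIntermediate : Int) (out : List String × List String × List String × List String × List (List String) × List String × Int × List String) : Decidable (Spec_mapOneBatch sig_num_list startingIntermediate out) := by
  unfold Spec_mapOneBatch
  letI i1 : DecidableEq (Int × List String) := instDecidableEqProd
  letI i2 : DecidableEq (List String × Int × List String) := instDecidableEqProd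
  letI i3 : DecidableEq (List (List String) × List String × Int × List String) := instDecidableEqProd
  letI i4 : DecidableEq (List String × List (List String) × List String × Int × List String) := instDecidableEqProd
  letI i5 : DecidableEq (List String × List String × List (List String) × List String × Int × List String) := instDecidableEqProd
  letI i6 : DecidableEq (List String × List String × List String × List (List String) × List String × Int × List String) := instDecidableEqProd
  letI i7 : DecidableEq (List String × List String × List String × List String × List (List String) × List String × Int × List String) := instDecidableEqProd
  exact i7 _ _

-- ===== CLAIM (what is proved, stated in full; the proofs are below) =====
def Claim_equal_mapOneBatch : Prop := ∀ (sig_num_list : List Int) (startingIntermediate : Int), Dom_mapOneBatch sig_num_list startingIntermediate → Spec_mapOneBatch sig_num_list startingIntermediate (mapOneBatch sig_num_list startingIntermediate)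

-- ===== LEMMAS AND PROOFS =====

theorem key : ∀ (N : Nat) (l : List Int), l.length ≤ N → ∀ (i s : Int)
    (batch decs vdecs vinits assigns resets names : List String),
    (4:Int) ∣ s →
    loopA l i s batch decs vdecs vinits assigns resets names =
      ((decs ++ (loopB l i).1, resets ++ (loopB l i).2.1, vdecs ++ (loopB l i).2.2.1,
        vinits ++ (loopB l i).2.2.2.1, [batch ++ (loopB l i).2.2.2.2.2.2],
        assigns ++ (loopB l i).2.2.2.2.1,
        i + PySem.Int.floordiv (l.length : Int) 4, names ++ (loopB l i).2.2.2.2.2.1)) := by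
  intro N
  induction N with
  | zero =>
    intro l hl i s batch decs vdecs vinits assigns resets names hs
    have : l = [] := List.length_eq_zero_iff.mp (Nat.le_zero.mp hl)
    subst this
    simp [loopA, loopB]
  | succ N ih =>
    intro l hl i s batch decs vdecs vinits assigns resets names hs
    have v1 : ¬(4:Int) ∣ s+1 := by omega
    have v1' : ¬(4:Int) ∣ 1+s := by omega
    have v2 : ¬(4:Int) ∣ s+1+1 := by omega
    have v2' : ¬(4:Int) ∣ 2+s := by omega
    have v2'' : ¬(4:Int) ∣ s+2 := by omega
    have v3 : ¬(4:Int) ∣ s+1+1+1 := by omega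
    have v3' : ¬(4:Int) ∣ 3+s := by omega
    have v3'' : ¬(4:Int) ∣ s+3 := by omega
    have v4 : (4:Int) ∣ s+1+1+1+1 := by omega
    have v4' : (4:Int) ∣ 4+s := by omega
    have v4'' : (4:Int) ∣ s+4 := by omega
    match l with
    | [] => simp [loopA, loopB]
    | [a] =>
      simp [loopA, loopB, hs, v1, v1', PySem.List.slice_to, PySem.List.slice_from, nmB, declareOneIntermediateA, resetOneIntermediateA, oneIntermediateNameA, declareOneVariableA, initializeUpperStageVariableA, assignIntermediateA, makeOneIntermediateIfStatementA, ifLinesB, tabA, List.append_assoc]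
    | [a, b] =>
      simp [loopA, loopB, hs, v1, v1', v2, v2', v2'', PySem.List.slice_to, PySem.List.slice_from, nmB, declareOneIntermediateA, resetOneIntermediateA, oneIntermediateNameA, declareOneVariableA, initializeUpperStageVariableA, assignIntermediateA, makeOneIntermediateIfStatementA, ifLinesB, tabA, List.append_assoc]
    | [a, b, c] =>
      simp [loopA, loopB, hs, v1, v1', v2, v2', v2'', v3, v3', v3'', PySem.List.slice_to, PySem.List.slice_from, nmB, declareOneIntermediateA, resetOneIntermediateA, oneIntermediateNameA, declareOneVariableA, initializeUpperStageVariableA, assignIntermediateA, makeOneIntermediateIfStatementA, ifLinesB, tabA, List.append_assoc]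
    | a :: b :: c :: d :: rest =>
      have hlen : rest.length ≤ N := by simp at hl; omega
      have hrec := ih rest hlen (i + 1) (s + 4)
        (batch ++ makeOneIntermediateIfStatementA a i ++ makeOneIntermediateIfStatementA b i ++
          makeOneIntermediateIfStatementA c i ++ makeOneIntermediateIfStatementA d i)
        (decs ++ [declareOneIntermediateA i]) (vdecs ++ [declareOneVariableA i])
        (vinits ++ [initializeUpperStageVariableA i]) (assigns ++ [assignIntermediateA i])
        (resets ++ [resetOneIntermediateA i]) (names ++ [oneIntermediateNameA i]) v4''
      have hA : loopA (a :: b :: c :: d :: rest) i s batch decs vdecs vinits assigns resets names =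
          loopA rest (i + 1) (s + 4)
            (batch ++ makeOneIntermediateIfStatementA a i ++ makeOneIntermediateIfStatementA b i ++
              makeOneIntermediateIfStatementA c i ++ makeOneIntermediateIfStatementA d i)
            (decs ++ [declareOneIntermediateA i]) (vdecs ++ [declareOneVariableA i])
            (vinits ++ [initializeUpperStageVariableA i]) (assigns ++ [assignIntermediateA i])
            (resets ++ [resetOneIntermediateA i]) (names ++ [oneIntermediateNameA i]) := by
        have e4 : s + 1 + 1 + 1 + 1 = s + 4 := by ring
        simp [loopA, hs, v1, v1', v2, v2', v2'', v3, v3', v3'', v4, v4', v4'', List.append_assoc, e4]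
      have hB : loopB (a :: b :: c :: d :: rest) i =
          ( declareOneIntermediateA i :: (loopB rest (i+1)).1,
            resetOneIntermediateA i :: (loopB rest (i+1)).2.1,
            declareOneVariableA i :: (loopB rest (i+1)).2.2.1,
            initializeUpperStageVariableA i :: (loopB rest (i+1)).2.2.2.1,
            assignIntermediateA i :: (loopB rest (i+1)).2.2.2.2.1,
            oneIntermediateNameA i :: (loopB rest (i+1)).2.2.2.2.2.1,
            (makeOneIntermediateIfStatementA a i ++ makeOneIntermediateIfStatementA b i ++
             makeOneIntermediateIfStatementA c i ++ makeOneIntermediateIfStatementA d i) ++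
              (loopB rest (i+1)).2.2.2.2.2.2 ) := by
        rw [loopB]
        simp [PySem.List.slice_to, PySem.List.slice_from, nmB, declareOneIntermediateA, resetOneIntermediateA, oneIntermediateNameA, declareOneVariableA, initializeUpperStageVariableA, assignIntermediateA, makeOneIntermediateIfStatementA, ifLinesB, tabA, List.append_assoc]
      rw [hA, hrec, hB]
      simp [List.append_assoc]
      try omega

-- ===== VERDICT (by name: the statement is the Claim_ definition above) =====
theorem mapOneBatch_spec : Claim_equal_mapOneBatch := by
  intro l i _
  unfold Spec_mapOneBatch mapOneBatch mapOneBatch_alt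
  rw [key l.length l le_rfl i 0 [] [] [] [] [] [] [] (by decide)]
  simp
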